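-- pv_equiv track=rewrite | github.com/MohMaya/CollegeCodes | 5th Semester/Computer Networking Lab/Python3/04 Hill Cipher/cipherDemo.py | prepareMessageVectorList
-- ===== SOURCE A (Python) =====
-- def valueOfAlphabet(alphabet):
--     value = ord(alphabet.upper())-ord('A')
--     return value
--
-- def prepareMessageVectorList(message,n):
--
--     if len(message)%n != 0:
--         #add Padding
--         paddingLength = n - (len(message) %n)
--         for i in range(paddingLength):
--             message+="X"
--
--     vectorList =[]
--
--     for i in range(0,len(message),n):
--         tempString = message[i:i+n]
--         tempVector = []
--         for character in tempString:
--             tempVector.append(valueOfAlphabet(character))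
--         vectorList.append(tempVector)
--
--     return vectorList
-- ===== SOURCE B (Python) =====
-- def prepareMessageVectorList(message, n):
--     if not message:
--         return []
--     padded = message + "X" * (-len(message) % n)
--     vals = [ord(c.upper()) - ord('A') for c in padded]
--     # column j holds the values at positions j, j+n, j+2n, ...; transposing the
--     # columns yields the n-vectors without ever chunking the message sequentially
--     columns = (vals[j::n] for j in range(n))
--     return [list(row) for row in zip(*columns)]
-- ===== Notes on version B (the rewrite author's own statement) =====
-- stated objective: alternative
-- what changed: Replaces A's sequential chunk loop (pre-pad with a char-by-char loop, then for each index i slice message[i:i+n] and convert it character by character) with a stride/transpose construction: one flat value map over the padded message, n stride slices vals[j::n], and an n-ary zip that transposes those columns into the vectors.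
-- outside the precondition, e.g. on prepareMessageVectorList('AB', 0): A raises ZeroDivisionError, B raises ZeroDivisionError
import Mathlib
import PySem

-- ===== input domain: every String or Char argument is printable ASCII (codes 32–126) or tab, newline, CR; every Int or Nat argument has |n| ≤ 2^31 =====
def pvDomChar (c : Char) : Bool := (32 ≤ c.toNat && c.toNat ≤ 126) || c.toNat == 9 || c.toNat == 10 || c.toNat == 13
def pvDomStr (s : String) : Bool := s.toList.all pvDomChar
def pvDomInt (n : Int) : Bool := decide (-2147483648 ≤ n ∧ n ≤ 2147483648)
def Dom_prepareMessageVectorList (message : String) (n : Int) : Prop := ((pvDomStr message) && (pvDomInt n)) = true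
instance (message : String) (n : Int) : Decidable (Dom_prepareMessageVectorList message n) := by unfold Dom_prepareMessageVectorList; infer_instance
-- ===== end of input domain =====

-- B replaces A's sequential chunk loop (pad, then slice chunk i..i+n and convert char
-- by char) by a stride/transpose construction: one flat value map, n stride slices
-- vals[j::n], and an n-ary zip of those columns (objective: alternative).

-- ===== PORT A =====
-- valueOfAlphabet: alphabet.upper() on a one-character string upper-cases that character
def valueOfAlphabet (alphabet : Char) : Int :=
  ((PySem.Chars.upperChar alphabet).toNat : Int) - (('A').toNat : Int)

def prepareMessageVectorList (message : String) (n : Int) : List (List Int) :=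
  let msg0 := message.toList
  let msg :=
    if PySem.Int.mod (msg0.length : Int) n ≠ 0 then
      let paddingLength := n - PySem.Int.mod (msg0.length : Int) n
      (PySem.List.pyRange 0 paddingLength 1).foldl (fun m _ => m ++ ['X']) msg0
    else msg0
  (PySem.List.pyRange 0 (msg.length : Int) n).foldl
    (fun vectorList i =>
      let tempString := PySem.List.slice msg (some i) (some (i + n))
      let tempVector := tempString.foldl (fun tv c => tv ++ [valueOfAlphabet c]) []
      vectorList ++ [tempVector]) []

-- ===== PORT B =====
-- the value map from Source B's comprehension, ord(c.upper()) - ord('A')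
def pvVal (c : Char) : Int :=
  ((PySem.Chars.upperChar c).toNat : Int) - (('A').toNat : Int)

-- heads and tails of all columns if every column is nonempty (how zip advances)
def pvHeadsTails {α : Type} : List (List α) → Option (List α × List (List α))
  | [] => some ([], [])
  | [] :: _ => none
  | (h :: t) :: rest => (pvHeadsTails rest).map (fun p => (h :: p.1, t :: p.2))

-- zip(*cols): rows of heads while every column is nonempty (Python's zip truncates)
def pvZip {α : Type} : List (List α) → List (List α)
  | [] => []
  | [] :: _ => []
  | (h :: t) :: rest =>
    match pvHeadsTails rest with
    | none => []
    | some (hs, ts) => (h :: hs) :: pvZip (t :: ts)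
termination_by cols => (cols.headD []).length
decreasing_by simp [List.headD]

def prepareMessageVectorList_alt (message : String) (n : Int) : List (List Int) :=
  if message.toList = [] then []
  else
  let padded := message.toList ++
    PySem.List.pyRepeat ['X'] (PySem.Int.mod (-(message.toList.length : Int)) n)
  let vals := padded.map pvVal
  -- vals[j::n]; slice? is none only for n = 0, where the Python raises (outside Pre_),
  -- so the .getD [] default is never reached on admitted inputs
  let columns := (PySem.List.pyRange 0 n 1).map
    (fun j => (PySem.List.slice? vals (some j) none n).getD [])
  pvZip columns

-- ===== PRECONDITION & SPEC =====
-- Pre_ excludes exactly n = 0, on which Python A raises ZeroDivisionError.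
def Pre_prepareMessageVectorList (message : String) (n : Int) : Prop := n ≠ 0
instance (message : String) (n : Int) : Decidable (Pre_prepareMessageVectorList message n) := by unfold Pre_prepareMessageVectorList; infer_instance
def pvWitness_prepareMessageVectorList : String × Int := ("HELLO", 3)

def Spec_prepareMessageVectorList (message : String) (n : Int) (out : List (List Int)) : Prop := out = prepareMessageVectorList_alt message n
instance (message : String) (n : Int) (out : List (List Int)) : Decidable (Spec_prepareMessageVectorList message n out) := by unfold Spec_prepareMessageVectorList; infer_instance

-- ===== CLAIM (what is proved, stated in full; the proofs are below) =====
def Claim_equal_prepareMessageVectorList : Prop := ∀ (message : String) (n : Int), Dom_prepareMessageVectorList message n → Pre_prepareMessageVectorList message n → Spec_prepareMessageVectorList message n (prepareMessageVectorList message n)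

-- ===== LEMMAS AND PROOFS =====

-- A's chunk view of a value list: slices [i, i+n) for i in range(0, len, n)
def pvChunks (v : List Int) (n : Int) : List (List Int) :=
  (PySem.List.pyRange 0 (v.length : Int) n).map
    (fun i => PySem.List.slice v (some i) (some (i + n)))

-- B's stride view: zip of the n stride columns v[j::n]
def pvStrides (v : List Int) (n : Int) : List (List Int) :=
  pvZip ((PySem.List.pyRange 0 n 1).map
    (fun j => (PySem.List.slice? v (some j) none n).getD []))

-- slicing commutes with mapping a function over the list
theorem pv_slice_map {α β : Type} (f : α → β) (l : List α) (a? b? : Option Int) :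
    PySem.List.slice (l.map f) a? b? = (PySem.List.slice l a? b?).map f := by
  simp [PySem.List.slice, PySem.List.clampIdx, List.map_drop, List.map_take]

-- with a negative step and a nonnegative stop, range(0, L, n) is empty
theorem pv_pyRange_neg_step (L n : Int) (hL : 0 ≤ L) (hn : n < 0) :
    PySem.List.pyRange 0 L n = [] := by
  simp only [PySem.List.pyRange]
  rw [if_neg (by omega), if_neg (by omega), if_neg (by omega)]
  simp

-- the padded list A's conditional padding loop produces, as one replicate-append
theorem pv_paddedA (msg : List Char) (n : Int) (hn : 0 < n) :
    (if PySem.Int.mod (msg.length : Int) n ≠ 0 then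
      (PySem.List.pyRange 0 (n - PySem.Int.mod (msg.length : Int) n) 1).foldl
        (fun m _ => m ++ ['X']) msg
    else msg)
    = msg ++ List.replicate (PySem.Int.mod (-(msg.length : Int)) n).toNat 'X' := by
  simp only [PySem.Int.mod_eq_emod_of_pos hn]
  have hge := Int.emod_nonneg (msg.length : Int) (by omega : n ≠ 0)
  have hlt := Int.emod_lt_of_pos (msg.length : Int) hn
  split_ifs with h
  · have e1 : (-(msg.length : Int)) % n = n - (msg.length : Int) % n := by
      have hsplit := Int.emod_add_mul_ediv (msg.length : Int) n
      have e2 : -(msg.length : Int) =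
          (n - (msg.length : Int) % n) + n * (-((msg.length : Int) / n) - 1) := by
        linear_combination hsplit
      rw [e2, Int.add_mul_emod_self_left, Int.emod_eq_of_lt (by omega) (by omega)]
    rw [PySem.List.foldl_append_singleton_eq_map (f := fun _ => 'X')]
    congr 1
    rw [List.map_const']
    congr 1
    rw [PySem.List.length_pyRange_one, e1]
    omega
  · have h2 : n ∣ (msg.length : Int) := Int.dvd_of_emod_eq_zero (by omega)
    have h0 : (-(msg.length : Int)) % n = 0 := Int.emod_eq_zero_of_dvd (dvd_neg.mpr h2)
    simp [h0]

-- A, for positive n, is the chunk view of the padded value list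
theorem pv_A_eq_chunks (message : String) (n : Int) (hn : 0 < n) :
    prepareMessageVectorList message n =
      pvChunks ((message.toList ++
        List.replicate (PySem.Int.mod (-(message.toList.length : Int)) n).toNat 'X').map
        valueOfAlphabet) n := by
  simp only [prepareMessageVectorList, pvChunks]
  rw [pv_paddedA message.toList n hn]
  set P := message.toList ++
    List.replicate (PySem.Int.mod (-(message.toList.length : Int)) n).toNat 'X' with hp
  have hcong := PySem.List.foldl_congr_mem
    (l := PySem.List.pyRange 0 ((P.length : Int)) n) (init := ([] : List (List Int)))
    (f := fun vectorList i => vectorList ++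
      [(PySem.List.slice P (some i) (some (i + n))).foldl
        (fun tv c => tv ++ [valueOfAlphabet c]) []])
    (g := fun vectorList i => vectorList ++
      [(PySem.List.slice P (some i) (some (i + n))).map valueOfAlphabet])
    (fun acc x _ => by
      show acc ++ [(PySem.List.slice P (some x) (some (x + n))).foldl
          (fun tv c => tv ++ [valueOfAlphabet c]) []]
        = acc ++ [(PySem.List.slice P (some x) (some (x + n))).map valueOfAlphabet]
      rw [PySem.List.foldl_append_singleton_eq_map (f := valueOfAlphabet)]
      simp)
  rw [hcong, PySem.List.foldl_append_singleton_eq_map]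
  simp only [List.length_map, List.nil_append]
  apply List.map_congr_left
  intro i _
  rw [pv_slice_map]

-- B is the stride view of the same padded value list
theorem pv_B_eq_strides (message : String) (n : Int) (hm : message.toList ≠ []) :
    prepareMessageVectorList_alt message n =
      pvStrides ((message.toList ++
        List.replicate (PySem.Int.mod (-(message.toList.length : Int)) n).toNat 'X').map
        valueOfAlphabet) n := by
  simp only [prepareMessageVectorList_alt, pvStrides, if_neg hm]
  rw [PySem.List.pyRepeat_singleton]
  rfl

-- for negative n the padding range and the chunk range are both empty, so A returns []
theorem pv_A_neg (message : String) (n : Int) (hneg : n < 0) :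
    prepareMessageVectorList message n = [] := by
  have hmb := PySem.Int.mod_neg_bounds (a := (message.toList.length : Int)) hneg
  simp only [prepareMessageVectorList]
  rw [PySem.List.pyRange_one_eq_nil (by omega :
    n - PySem.Int.mod ((message.toList.length : Int)) n ≤ 0)]
  simp only [List.foldl_nil, ite_self]
  rw [pv_pyRange_neg_step _ n (Int.natCast_nonneg _) hneg]
  rfl

-- the elements a slice?-column takes after the first one, shifted to the dropped list
theorem pv_filterMap_step (v : List Int) (j n : Int) (C : Nat) (hj0 : 0 ≤ j) (hn : 0 < n)
    (hjL : j < (v.length : Int)) :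
    List.filterMap (fun x : Nat => v[(j + n * (x:Int)).toNat]?) (List.range (C+1)) =
      v[j.toNat]! :: List.filterMap (fun x : Nat => (v.drop n.toNat)[(j + n * (x:Int)).toNat]?) (List.range C) := by
  have hjv : j.toNat < v.length := by omega
  rw [List.range_succ_eq_map, List.filterMap_cons, List.filterMap_map]
  simp only [Nat.cast_zero, mul_zero, add_zero, List.getElem?_eq_getElem hjv,
    getElem!_pos v j.toNat hjv]
  congr 1
  congr 1
  funext x
  have hnk : 0 ≤ n * (x:Int) := mul_nonneg hn.le (Int.natCast_nonneg x)
  show v[(j + n * ((x+1 : Nat):Int)).toNat]? = (v.drop n.toNat)[(j + n * (x:Int)).toNat]?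
  rw [List.getElem?_drop]
  congr 1
  push_cast
  have : n * ((x:Int)+1) = n * x + n := by ring
  omega

-- the stride column v[j::n] for 0 ≤ j < n ≤ len(v): head element plus the column of drop n v
theorem pv_stride_cons (v : List Int) (j n : Int) (hj0 : 0 ≤ j) (hjn : j < n)
    (hlen : n ≤ (v.length : Int)) :
    (PySem.List.slice? v (some j) none n).getD [] =
      v[j.toNat]! :: (PySem.List.slice? (v.drop n.toNat) (some j) none n).getD [] := by
  have hjL : j < (v.length : Int) := lt_of_lt_of_le hjn hlen
  have hD : ((v.length - n.toNat : Nat) : Int) = (v.length : Int) - n := by omega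
  simp only [PySem.List.slice?, PySem.List.sliceIndices, if_neg (by omega : ¬ n = 0)]
  simp only [if_neg (by omega : ¬ n < 0), if_pos (by omega : (0:Int) < n),
    if_neg (not_lt.mpr hj0), List.length_drop, min_eq_left hjL.le, if_pos hjL]
  rw [hD]
  rcases lt_or_ge j ((v.length : Int) - n) with hc | hc
  · rw [min_eq_left hc.le, if_pos hc]
    have e2 : ((v.length : Int) - j + n - 1) / n = ((v.length : Int) - j - 1) / n + 1 := by
      have := Int.add_mul_ediv_right ((v.length : Int) - j - 1) 1 (by omega : n ≠ 0)
      rw [show (v.length : Int) - j + n - 1 = (v.length : Int) - j - 1 + 1 * n by ring, this]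
    have hA : 0 ≤ ((v.length : Int) - j - 1) / n := Int.ediv_nonneg (by omega) (by omega)
    have eC1 : (((v.length : Int) - j + n - 1) / n).toNat
        = ((((v.length : Int) - j - 1) / n)).toNat + 1 := by omega
    have eC2 : ((v.length : Int) - n - j + n - 1) = ((v.length : Int) - j - 1) := by ring
    rw [eC1, eC2, Option.getD_some, Option.getD_some]
    exact pv_filterMap_step v j n _ hj0 (by omega) hjL
  · rw [min_eq_right hc, if_neg (lt_irrefl _)]
    have e1 : ((v.length : Int) - j + n - 1) / n = 1 := by
      have h := (PySem.Int.floordiv_eq_iff_of_pos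
        (a := (v.length : Int) - j + n - 1) (b := n) (q := 1) (by omega)).mpr
        ⟨by omega, by omega⟩
      rwa [PySem.Int.floordiv_eq_ediv_of_pos (by omega)] at h
    rw [e1]
    have hjv : j.toNat < v.length := by omega
    simp [List.getElem?_eq_getElem hjv, getElem!_pos v j.toNat hjv]

-- an empty list has empty stride columns
theorem pv_stride_nil (n : Int) (hn : 0 < n) (j : Int) (hj : 0 ≤ j) :
    (PySem.List.slice? ([] : List Int) (some j) none n).getD [] = [] := by
  simp only [PySem.List.slice?, PySem.List.sliceIndices, if_neg hn.ne']
  simp only [List.length_nil, Nat.cast_zero, if_neg (lt_asymm hn), if_pos hn,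
    if_neg (not_lt.mpr hj), min_eq_right hj]
  simp

-- heads/tails of a list of manifest cons columns
theorem pv_headsTails_map {α β : Type} (a : β → α) (b : β → List α) (xs : List β) :
    pvHeadsTails (xs.map (fun j => a j :: b j)) = some (xs.map a, xs.map b) := by
  induction xs with
  | nil => rfl
  | cons x xs ih => simp [pvHeadsTails, ih]

-- the first n elements, read off index by index
theorem pv_map_getElem_take (v : List Int) (n : Int)
    (hlen : n ≤ (v.length : Int)) :
    (PySem.List.pyRange 0 n 1).map (fun j => v[j.toNat]!) = v.take n.toNat := by
  rw [PySem.List.pyRange_one, List.map_map]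
  apply List.ext_getElem
  · simp; omega
  · intro i h1 h2
    simp only [List.getElem_map, List.getElem_range, Function.comp_apply, List.getElem_take]
    have hi : i < v.length := by simp at h1; omega
    rw [show ((0:Int) + (i:Int)).toNat = i by omega, getElem!_pos v i hi]

-- one zip row: strides of v = take n v followed by strides of drop n v
theorem pv_strides_step (v : List Int) (n : Int) (hn : 0 < n)
    (hlen : n ≤ (v.length : Int)) :
    pvStrides v n = v.take n.toNat :: pvStrides (v.drop n.toNat) n := by
  unfold pvStrides
  have hcols : List.map (fun j => (PySem.List.slice? v (some j) none n).getD [])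
        (PySem.List.pyRange 0 n 1)
      = List.map (fun j => v[j.toNat]! ::
          (PySem.List.slice? (v.drop n.toNat) (some j) none n).getD [])
        (PySem.List.pyRange 0 n 1) := by
    apply List.map_congr_left
    intro j hj
    rw [PySem.List.mem_pyRange_one] at hj
    exact pv_stride_cons v j n hj.1 hj.2 hlen
  rw [hcols, PySem.List.pyRange_one_cons (by omega : (0:Int) < n)]
  simp only [List.map_cons, zero_add]
  rw [pvZip.eq_def]
  simp only [pv_headsTails_map]
  rw [show ((0:Int).toNat) = 0 from rfl]
  congr 1
  have h := pv_map_getElem_take v n hlen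
  rw [PySem.List.pyRange_one_cons (by omega : (0:Int) < n)] at h
  simpa using h

-- range(0, L, n) for positive n and L: first index 0, then the shifted remaining range
theorem pv_pyRange_pos_cons (L n : Int) (hn : 0 < n) (hL : 0 < L) :
    PySem.List.pyRange 0 L n = 0 :: (PySem.List.pyRange 0 (L - n) n).map (fun i => n + i) := by
  rw [PySem.List.pyRange_of_pos 0 L hn, PySem.List.pyRange_of_pos 0 (L - n) hn]
  rcases lt_or_ge n L with h | h
  · rw [if_pos hL, if_pos (by omega : (0:Int) < L - n)]
    have e2 : (L - 0 + n - 1) / n = (L - n - 0 + n - 1) / n + 1 := by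
      have := Int.add_mul_ediv_right (L - n - 0 + n - 1) 1 (by omega : n ≠ 0)
      rw [show L - 0 + n - 1 = L - n - 0 + n - 1 + 1 * n by ring, this]
    have hA : 0 ≤ (L - n - 0 + n - 1) / n := Int.ediv_nonneg (by omega) (by omega)
    rw [show ((L - 0 + n - 1) / n).toNat = ((L - n - 0 + n - 1) / n).toNat + 1 by omega,
      List.range_succ_eq_map, List.map_cons, List.map_map, List.map_map]
    congr 1
    · simp
    · congr 1
      funext k
      show (0:Int) + n * ((k+1 : Nat) : Int) = n + (0 + n * (k : Int))
      push_cast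
      ring
  · rw [if_pos hL, if_neg (by omega : ¬ (0:Int) < L - n)]
    have e1 : (L - 0 + n - 1) / n = 1 := by
      have h1 := (PySem.Int.floordiv_eq_iff_of_pos
        (a := L - 0 + n - 1) (b := n) (q := 1) hn).mpr ⟨by omega, by omega⟩
      rwa [PySem.Int.floordiv_eq_ediv_of_pos hn] at h1
    rw [e1]
    simp

-- one chunk: chunks of v = take n v followed by chunks of drop n v
theorem pv_chunks_step (v : List Int) (n : Int) (hn : 0 < n)
    (hlen : n ≤ (v.length : Int)) :
    pvChunks v n = v.take n.toNat :: pvChunks (v.drop n.toNat) n := by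
  unfold pvChunks
  rw [pv_pyRange_pos_cons (v.length : Int) n hn (by omega)]
  simp only [List.map_cons, List.map_map]
  congr 1
  · rw [PySem.List.slice_toNat v (a := 0) (b := 0 + n) (by omega) (by omega)]
    simp
  · rw [show ((v.drop n.toNat).length : Int) = (v.length : Int) - n by
      simp only [List.length_drop]; omega]
    apply List.map_congr_left
    intro i hi
    have hi0 : 0 ≤ i := ((PySem.List.mem_pyRange_iff_of_pos hn i).mp hi).1
    show PySem.List.slice v (some (n + i)) (some (n + i + n))
        = PySem.List.slice (v.drop n.toNat) (some i) (some (i + n))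
    rw [PySem.List.slice_toNat v (a := n + i) (b := n + i + n) (by omega) (by omega),
      PySem.List.slice_toNat (v.drop n.toNat) (a := i) (b := i + n) hi0 (by omega),
      List.drop_drop]
    congr 1
    · omega
    · congr 1
      omega

-- main: on a value list whose length is a multiple of n, both views agree
theorem pv_strides_eq_chunks (n : Int) (hn : 0 < n) :
    ∀ (L : Nat) (v : List Int), v.length = L → n ∣ (v.length : Int) →
      pvStrides v n = pvChunks v n := by
  intro L
  induction L using Nat.strong_induction_on with
  | _ L IH =>
    intro v hL hd
    by_cases hv : v = []
    · subst hv
      unfold pvStrides pvChunks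
      rw [PySem.List.pyRange_one_cons (by omega : (0:Int) < n)]
      simp only [List.map_cons]
      rw [pv_stride_nil n hn 0 le_rfl]
      rw [show PySem.List.pyRange 0 (([] : List Int).length : Int) n = [] by
        rw [PySem.List.pyRange_of_pos 0 _ hn]
        simp]
      simp [pvZip]
    · obtain ⟨k, hk⟩ := hd
      have h1 : (1 : Int) ≤ (v.length : Int) := by
        have := List.length_pos_iff.mpr hv
        omega
      have hlen : n ≤ (v.length : Int) := by
        by_contra hco
        push_neg at hco
        have hk1 : k ≤ 0 := by nlinarith
        nlinarith
      rw [pv_strides_step v n hn hlen, pv_chunks_step v n hn hlen,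
        IH (v.drop n.toNat).length (by simp; omega) _ rfl (by
          refine ⟨k - 1, ?_⟩
          simp only [List.length_drop]
          have hm : n * (k - 1) = (v.length : Int) - n := by
            rw [mul_sub, ← hk]; ring
          omega)]

theorem prepareMessageVectorList_eq (message : String) (n : Int) (hn : n ≠ 0) :
    prepareMessageVectorList message n = prepareMessageVectorList_alt message n := by
  by_cases hm : message.toList = []
  · have halt : prepareMessageVectorList_alt message n = [] := by
      simp [prepareMessageVectorList_alt, hm]
    rw [halt]
    rcases lt_or_gt_of_ne hn with hneg | hpos
    · exact pv_A_neg message n hneg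
    · rw [pv_A_eq_chunks message n hpos]
      unfold pvChunks
      rw [hm]
      simp [PySem.Int.mod_eq_emod_of_pos hpos, PySem.List.pyRange_of_pos 0 _ hpos]
  rcases lt_or_gt_of_ne hn with hneg | hpos
  · rw [pv_A_neg message n hneg]
    simp only [prepareMessageVectorList_alt, if_neg hm]
    rw [PySem.List.pyRange_one_eq_nil (by omega : n ≤ 0)]
    simp [pvZip]
  · rw [pv_A_eq_chunks message n hpos, pv_B_eq_strides message n hm]
    refine (pv_strides_eq_chunks n hpos _ _ rfl ?_).symm
    have hm0 : 0 ≤ PySem.Int.mod (-(message.toList.length : Int)) n :=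
      PySem.Int.mod_nonneg _ hpos
    simp only [List.length_map, List.length_append, List.length_replicate]
    push_cast [Int.toNat_of_nonneg hm0]
    rw [PySem.Int.mod_eq_emod_of_pos hpos, Int.emod_def]
    exact ⟨-((-(message.toList.length : Int)) / n), by ring⟩

-- ===== VERDICT (by name: the statement is the Claim_ definition above) =====
theorem prepareMessageVectorList_spec : Claim_equal_prepareMessageVectorList := by
  intro message n _ hpre
  unfold Spec_prepareMessageVectorList
  exact prepareMessageVectorList_eq message n hpre
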